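-- pv_equiv track=rewrite | github.com/SuhyungK/Algorithm | Baekjoon/Platinum/baekjoon_23291.py | fish_control
-- ===== SOURCE A (Python) =====
-- def fish_control(arr):
--     n = len(arr)
--     tmp = [[0]*len(arr[i]) for i in range(n)]
--
--     for i in range(n):
--         m = len(arr[i])
--         for j in range(m):
--             for ni, nj in (i-1, j), (i, j+1):
--                 if not(-1<ni<n and -1<nj<m):
--                     continue
--
--                 mod = abs(arr[i][j] - arr[ni][nj])//5
--                 if mod < 0:
--                     continue
--                 if arr[i][j] > arr[ni][nj]:
--                     tmp[ni][nj] += mod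
--                     tmp[i][j] -= mod
--                 else:
--                     tmp[i][j] += mod
--                     tmp[ni][nj] -= mod
--
--     for i in range(n):
--         for j in range(len(arr[i])):
--             arr[i][j] += tmp[i][j]
--     return arr
-- ===== SOURCE B (Python) =====
-- def fish_control(arr):
--     # Returns a fresh grid (does not mutate arr, unlike A); equal return value.
--     n = len(arr)
--
--     def recv(a, b):
--         d = abs(a - b) // 5
--         return d if b > a else -d
--
--     out = []
--     for i in range(n):
--         row = arr[i]
--         new_row = []
--         for j in range(len(row)):
--             v = row[j]
--             s = 0
--             if i > 0 and j < len(arr[i - 1]):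
--                 s += recv(v, arr[i - 1][j])
--             if i + 1 < n and j < len(arr[i + 1]):
--                 s += recv(v, arr[i + 1][j])
--             if j > 0:
--                 s += recv(v, row[j - 1])
--             if j + 1 < len(row):
--                 s += recv(v, row[j + 1])
--             new_row.append(v + s)
--         out.append(new_row)
--     return out
-- ===== Notes on version B (the rewrite author's own statement) =====
-- stated objective: alternative
-- what changed: Replaces A's mutable delta grid (tmp) filled by per-cell updates to up/right neighbours and then added back, with a direct pure per-cell closed form: each output cell is its value plus the sum of signed transfers recv(v, neighbour) over its up/down/left/right neighbours, built as a fresh nested comprehension-style pass with no intermediate grid and no mutation.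
import Mathlib
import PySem

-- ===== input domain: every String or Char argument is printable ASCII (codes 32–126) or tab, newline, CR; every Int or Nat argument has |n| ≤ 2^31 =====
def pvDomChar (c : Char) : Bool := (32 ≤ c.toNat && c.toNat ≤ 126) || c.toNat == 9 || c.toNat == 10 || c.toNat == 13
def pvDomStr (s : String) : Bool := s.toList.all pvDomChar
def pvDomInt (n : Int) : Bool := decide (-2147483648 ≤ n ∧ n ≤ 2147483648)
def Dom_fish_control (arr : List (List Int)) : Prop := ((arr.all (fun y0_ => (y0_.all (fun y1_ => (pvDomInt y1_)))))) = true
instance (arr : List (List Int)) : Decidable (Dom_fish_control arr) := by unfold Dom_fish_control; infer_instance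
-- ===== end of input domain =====

-- B replaces A's mutable delta grid with a pure per-cell closed form (sum of the signed
-- transfers with the neighbours that exist); same return value. A mutates its argument in
-- place and returns it, B builds a fresh grid: the equivalence proved is about the RETURN value.

-- ===== PORT A =====
-- in-range Python indexing arr[i][j] is ported as getD (the default is never reached on
-- Pre_; the read arr[ni][nj] is in range exactly on Pre_, outside it Python raises IndexError)
def getAt (t : List (List Int)) (i j : Nat) : Int := (t.getD i []).getD j 0

-- tmp[i][j] += d (Python in-place update of an in-range cell)
def upd (t : List (List Int)) (i j : Nat) (d : Int) : List (List Int) :=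
  t.modify i (fun row => row.modify j (· + d))

def fish_control (arr : List (List Int)) : List (List Int) :=
  let n := arr.length
  let tmp0 := arr.map (fun row => row.map (fun _ => (0 : Int)))
  let tmp := (List.range n).foldl (fun (t : List (List Int)) (i : Nat) =>
    let m := (arr.getD i []).length
    (List.range m).foldl (fun (t : List (List Int)) (j : Nat) =>
      ([((i : Int) - 1, (j : Int)), ((i : Int), (j : Int) + 1)]).foldl
        (fun (t : List (List Int)) (p : Int × Int) =>
        if ¬(-1 < p.1 ∧ p.1 < (n : Int) ∧ -1 < p.2 ∧ p.2 < (m : Int)) then t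
        else
          let a := getAt arr i j
          let b := getAt arr p.1.toNat p.2.toNat
          let md : Int := ((a - b).natAbs : Int) / 5
          if md < 0 then t
          else if a > b then upd (upd t p.1.toNat p.2.toNat md) i j (-md)
          else upd (upd t i j md) p.1.toNat p.2.toNat (-md)) t) t) tmp0
  (List.range n).foldl (fun (acc : List (List Int)) (i : Nat) =>
    (List.range (arr.getD i []).length).foldl (fun (acc : List (List Int)) (j : Nat) =>
      upd acc i j (getAt tmp i j)) acc) arr

-- ===== PORT B =====
def recvI (a b : Int) : Int :=
  let d : Int := ((a - b).natAbs : Int) / 5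
  if b > a then d else -d

def fish_control_alt (arr : List (List Int)) : List (List Int) :=
  let n := arr.length
  (List.range n).map (fun i =>
    let row := arr.getD i []
    (List.range row.length).map (fun j =>
      let v := row.getD j 0
      let s :=
        (if 0 < i ∧ j < (arr.getD (i - 1) []).length then recvI v ((arr.getD (i - 1) []).getD j 0) else 0)
        + (if i + 1 < n ∧ j < (arr.getD (i + 1) []).length then recvI v ((arr.getD (i + 1) []).getD j 0) else 0)
        + (if 0 < j then recvI v (row.getD (j - 1) 0) else 0)
        + (if j + 1 < row.length then recvI v (row.getD (j + 1) 0) else 0)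
      v + s))

-- ===== PRECONDITION & SPEC =====
-- Pre_: row lengths are non-increasing down the grid. On exactly the excluded inputs
-- (some row longer than the row above it) Python A raises IndexError reading arr[i-1][j].
def Pre_fish_control (arr : List (List Int)) : Prop :=
  ∀ i ∈ List.range arr.length, (arr.getD (i + 1) []).length ≤ (arr.getD i []).length
instance (arr : List (List Int)) : Decidable (Pre_fish_control arr) := by
  unfold Pre_fish_control; infer_instance

def pvWitness_fish_control : List (List Int) := [[12, 3, 9], [6, 7], [1]]

def Spec_fish_control (arr : List (List Int)) (out : List (List Int)) : Prop := out = fish_control_alt arr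
instance (arr : List (List Int)) (out : List (List Int)) : Decidable (Spec_fish_control arr out) := by unfold Spec_fish_control; infer_instance

-- ===== CLAIM (what is proved, stated in full; the proofs are below) =====
def Claim_equal_fish_control : Prop := ∀ (arr : List (List Int)), Dom_fish_control arr → Pre_fish_control arr → Spec_fish_control arr (fish_control arr)

-- ===== LEMMAS AND PROOFS =====

def rlen (arr : List (List Int)) (i : Nat) : Nat := (arr.getD i []).length

-- apply a list of ((cell), delta) in-place additions
def applyAll (l : List ((Nat × Nat) × Int)) (t : List (List Int)) : List (List Int) :=
  l.foldl (fun t e => upd t e.1.1 e.1.2 e.2) t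

theorem getD_modify_add (r : List Int) (b j : Nat) (d : Int) :
    (r.modify b (· + d)).getD j 0 = r.getD j 0 + (if b = j ∧ j < r.length then d else 0) := by
  rw [List.getD_eq_getElem?_getD, List.getD_eq_getElem?_getD, List.getElem?_modify]
  rcases h : r[j]? with _ | v
  · have hle := List.getElem?_eq_none_iff.mp h
    rw [if_neg (by omega)]; simp
  · have hlt : j < r.length := by
      by_contra hc
      rw [List.getElem?_eq_none_iff.mpr (by omega)] at h; simp at h
    by_cases hb : b = j <;> simp [hb, hlt]

theorem length_upd (t : List (List Int)) (a b : Nat) (d : Int) :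
    (upd t a b d).length = t.length := by
  simp [upd]

theorem getD_upd (t : List (List Int)) (a b : Nat) (d : Int) (x : Nat) :
    (upd t a b d).getD x [] = if a = x then (t.getD x []).modify b (· + d) else t.getD x [] := by
  unfold upd
  rw [List.getD_eq_getElem?_getD, List.getElem?_modify]
  rcases h : t[x]? with _ | r
  · simp [List.getD_eq_getElem?_getD, h]
  · by_cases ha : a = x <;> simp [ha, List.getD_eq_getElem?_getD, h]

theorem rowlen_upd (t : List (List Int)) (a b : Nat) (d : Int) (x : Nat) :
    ((upd t a b d).getD x []).length = (t.getD x []).length := by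
  rw [getD_upd]; split <;> simp

theorem getAt_upd (t : List (List Int)) (a b : Nat) (d : Int) (i j : Nat) :
    getAt (upd t a b d) i j =
      getAt t i j + (if a = i ∧ b = j ∧ j < (t.getD i []).length then d else 0) := by
  unfold getAt
  rw [getD_upd]
  by_cases ha : a = i
  · rw [if_pos ha, getD_modify_add]
    by_cases hb : b = j ∧ j < (t.getD i []).length
    · rw [if_pos hb, if_pos ⟨ha, hb.1, hb.2⟩]
    · rw [if_neg hb, if_neg (by tauto)]
  · rw [if_neg ha, if_neg (by tauto)]; ring

theorem applyAll_cons (e : (Nat × Nat) × Int) (l : List ((Nat × Nat) × Int)) (t : List (List Int)) :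
    applyAll (e :: l) t = applyAll l (upd t e.1.1 e.1.2 e.2) := rfl

theorem applyAll_append (l₁ l₂ : List ((Nat × Nat) × Int)) (t : List (List Int)) :
    applyAll (l₁ ++ l₂) t = applyAll l₂ (applyAll l₁ t) := by
  unfold applyAll; rw [List.foldl_append]

theorem length_applyAll (l : List ((Nat × Nat) × Int)) (t : List (List Int)) :
    (applyAll l t).length = t.length := by
  induction l generalizing t with
  | nil => rfl
  | cons e l ih => rw [applyAll_cons, ih, length_upd]

theorem rowlen_applyAll (l : List ((Nat × Nat) × Int)) (t : List (List Int)) (x : Nat) :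
    ((applyAll l t).getD x []).length = (t.getD x []).length := by
  induction l generalizing t with
  | nil => rfl
  | cons e l ih => rw [applyAll_cons, ih, rowlen_upd]

theorem getAt_applyAll (l : List ((Nat × Nat) × Int)) (t : List (List Int)) (i j : Nat) :
    getAt (applyAll l t) i j =
      getAt t i j + (l.map (fun e =>
        if e.1.1 = i ∧ e.1.2 = j ∧ j < (t.getD i []).length then e.2 else 0)).sum := by
  induction l generalizing t with
  | nil => simp [applyAll]
  | cons e l ih =>
      rw [applyAll_cons, ih, getAt_upd]
      simp only [rowlen_upd, List.map_cons, List.sum_cons]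
      ring

-- list-sum over a range
def sumR (n : Nat) (f : Nat → Int) : Int := ((List.range n).map f).sum

theorem sumR_congr {n : Nat} {f g : Nat → Int} (h : ∀ x, x < n → f x = g x) :
    sumR n f = sumR n g := by
  unfold sumR
  induction n with
  | zero => rfl
  | succ k ih =>
      rw [List.range_succ, List.map_append, List.map_append, List.sum_append, List.sum_append]
      rw [ih (fun x hx => h x (Nat.lt_succ_of_lt hx))]
      simp [h k (Nat.lt_succ_self k)]

theorem sumR_zero (n : Nat) : sumR n (fun _ => (0 : Int)) = 0 := by
  simp [sumR]

theorem sumR_ite (n k : Nat) (c : Int) :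
    sumR n (fun x => if x = k then c else 0) = if k < n then c else 0 := by
  induction n with
  | zero => simp [sumR]
  | succ m ih =>
      unfold sumR at ih ⊢
      rw [List.range_succ, List.map_append, List.sum_append, ih]
      by_cases h : k < m
      · simp [h, Nat.lt_succ_of_lt h, Nat.ne_of_gt h]
      · by_cases h2 : k = m <;> simp [h, h2] <;> omega

theorem sumR2_ite (n : Nat) (m : Nat → Nat) (α β : Nat) (C : Int) :
    sumR n (fun i' => sumR (m i') (fun j' => if i' = α ∧ j' = β then C else 0)) =
      if α < n ∧ β < m α then C else 0 := by
  have h1 : ∀ i', i' < n →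
      sumR (m i') (fun j' => if i' = α ∧ j' = β then C else 0) =
      (if i' = α then (if β < m α then C else 0) else 0) := by
    intro i' _
    by_cases hi : i' = α
    · subst hi
      rw [if_pos rfl, ← sumR_ite (m i') β C]
      exact sumR_congr (fun x _ => by by_cases hx : x = β <;> simp [hx])
    · rw [if_neg hi]
      have hz := sumR_congr (n := m i') (f := fun j' => if i' = α ∧ j' = β then C else 0)
        (g := fun _ => 0) (fun x _ => by simp only []; rw [if_neg (by tauto)])
      rw [hz, sumR_zero]
  rw [sumR_congr h1, sumR_ite]
  by_cases hα : α < n <;> by_cases hβ : β < m α <;> simp [hα, hβ]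

theorem sum_map_flatMap {α β : Type} (l : List α) (f : α → List β) (g : β → Int) :
    ((l.flatMap f).map g).sum = (l.map (fun x => ((f x).map g).sum)).sum := by
  induction l with
  | nil => rfl
  | cons a l ih => simp [List.flatMap_cons, List.map_append, List.sum_append, ih]

-- the event list of A's sweep: all grid cells in traversal order
def E1 (arr : List (List Int)) : List (Nat × Nat) :=
  (List.range arr.length).flatMap (fun i => (List.range (rlen arr i)).map (fun j => (i, j)))

-- the updates one neighbour check of cell (i, j) performs
def updatesFor (arr : List (List Int)) (i j : Nat) (p : Int × Int) : List ((Nat × Nat) × Int) :=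
  if ¬(-1 < p.1 ∧ p.1 < (arr.length : Int) ∧ -1 < p.2 ∧ p.2 < ((arr.getD i []).length : Int)) then []
  else
    let a := getAt arr i j
    let b := getAt arr p.1.toNat p.2.toNat
    let md : Int := ((a - b).natAbs : Int) / 5
    if md < 0 then []
    else if a > b then [((p.1.toNat, p.2.toNat), md), ((i, j), -md)]
    else [((i, j), md), ((p.1.toNat, p.2.toNat), -md)]

def cellUpdates (arr : List (List Int)) (e : Nat × Nat) : List ((Nat × Nat) × Int) :=
  ([((e.1 : Int) - 1, (e.2 : Int)), ((e.1 : Int), (e.2 : Int) + 1)]).flatMap (updatesFor arr e.1 e.2)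

def tmp0F (arr : List (List Int)) : List (List Int) :=
  arr.map (fun row => row.map (fun _ => (0 : Int)))

def tmpF (arr : List (List Int)) : List (List Int) :=
  applyAll ((E1 arr).flatMap (cellUpdates arr)) (tmp0F arr)

-- transliteration helpers naming the two loops of port A (definitionally equal to its body)
def stepF (arr : List (List Int)) (i j : Nat) (t : List (List Int)) (p : Int × Int) : List (List Int) :=
  if ¬(-1 < p.1 ∧ p.1 < (arr.length : Int) ∧ -1 < p.2 ∧ p.2 < (((arr.getD i []).length : Nat) : Int)) then t
  else
    let a := getAt arr i j
    let b := getAt arr p.1.toNat p.2.toNat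
    let md : Int := ((a - b).natAbs : Int) / 5
    if md < 0 then t
    else if a > b then upd (upd t p.1.toNat p.2.toNat md) i j (-md)
    else upd (upd t i j md) p.1.toNat p.2.toNat (-md)

def bigTmp (arr : List (List Int)) : List (List Int) :=
  (List.range arr.length).foldl (fun (t : List (List Int)) (i : Nat) =>
    (List.range (arr.getD i []).length).foldl (fun (t : List (List Int)) (j : Nat) =>
      ([((i : Int) - 1, (j : Int)), ((i : Int), (j : Int) + 1)]).foldl (stepF arr i j) t) t) (tmp0F arr)

def finalF (arr T : List (List Int)) : List (List Int) :=
  (List.range arr.length).foldl (fun (acc : List (List Int)) (i : Nat) =>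
    (List.range (arr.getD i []).length).foldl (fun (acc : List (List Int)) (j : Nat) =>
      upd acc i j (getAt T i j)) acc) arr

set_option maxHeartbeats 1000000 in
theorem fish_control_defeq (arr : List (List Int)) :
    fish_control arr = finalF arr (bigTmp arr) := by
  unfold fish_control finalF bigTmp stepF tmp0F
  rfl

theorem foldl_applyAll {α : Type} (F : α → List ((Nat × Nat) × Int)) (l : List α) (t : List (List Int)) :
    l.foldl (fun t e => applyAll (F e) t) t = applyAll (l.flatMap F) t := by
  induction l generalizing t with
  | nil => rfl
  | cons a l ih => rw [List.foldl_cons, List.flatMap_cons, applyAll_append, ih]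

theorem step_eq (arr : List (List Int)) (i j : Nat) (t : List (List Int)) (p : Int × Int) :
    stepF arr i j t p = applyAll (updatesFor arr i j p) t := by
  unfold stepF updatesFor
  dsimp only
  split_ifs <;> rfl

theorem cell_eq (arr : List (List Int)) (i j : Nat) (t : List (List Int)) :
    ([((i : Int) - 1, (j : Int)), ((i : Int), (j : Int) + 1)]).foldl (stepF arr i j) t
      = applyAll (cellUpdates arr (i, j)) t := by
  show stepF arr i j (stepF arr i j t ((i : Int) - 1, (j : Int))) ((i : Int), (j : Int) + 1) = _
  rw [step_eq, step_eq]
  simp only [cellUpdates, List.flatMap_cons, List.flatMap_nil, List.append_nil, applyAll_append]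

theorem bigTmp_eq (arr : List (List Int)) : bigTmp arr = tmpF arr := by
  unfold bigTmp tmpF
  have hrow : (fun (t : List (List Int)) (i : Nat) =>
      (List.range (arr.getD i []).length).foldl (fun (t : List (List Int)) (j : Nat) =>
        ([((i : Int) - 1, (j : Int)), ((i : Int), (j : Int) + 1)]).foldl (stepF arr i j) t) t)
      = (fun t i => applyAll (((List.range (rlen arr i)).map (fun j => (i, j))).flatMap (cellUpdates arr)) t) := by
    funext t i
    rw [← foldl_applyAll, List.foldl_map]
    have hb : (fun (t : List (List Int)) (j : Nat) =>
        ([((i : Int) - 1, (j : Int)), ((i : Int), (j : Int) + 1)]).foldl (stepF arr i j) t)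
        = (fun (t : List (List Int)) (j : Nat) => applyAll (cellUpdates arr (i, j)) t) := by
      funext t j; exact cell_eq arr i j t
    rw [hb]; rfl
  rw [hrow]
  have h2 : (fun (t : List (List Int)) (i : Nat) =>
      applyAll (((List.range (rlen arr i)).map (fun j => (i, j))).flatMap (cellUpdates arr)) t)
      = (fun t i => applyAll ((fun i => ((List.range (rlen arr i)).map (fun j => (i, j))).flatMap (cellUpdates arr)) i) t) := rfl
  rw [h2, foldl_applyAll]
  congr 1
  unfold E1
  rw [List.flatMap_assoc]

theorem finalF_eq (arr T : List (List Int)) :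
    finalF arr T = applyAll ((E1 arr).map (fun e => (e, getAt T e.1 e.2))) arr := by
  unfold finalF applyAll E1
  rw [List.foldl_map, List.foldl_flatMap]
  congr 1
  funext acc i
  rw [List.foldl_map]
  rfl

theorem fish_control_eq (arr : List (List Int)) :
    fish_control arr = applyAll ((E1 arr).map (fun e => (e, getAt (tmpF arr) e.1 e.2))) arr := by
  rw [fish_control_defeq, bigTmp_eq, finalF_eq]

-- per-event contribution at a fixed read cell
theorem md_nonneg (x : Int) : ¬ (((x.natAbs : Int)) / 5 < 0) := by
  have h : (0 : Int) ≤ (x.natAbs : Int) / 5 := Int.ediv_nonneg (by positivity) (by norm_num)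
  omega

theorem recvI_of_gt (a b : Int) (h : b < a) : recvI a b = -(((a - b).natAbs : Int) / 5) := by
  unfold recvI; rw [if_neg (by omega)]

theorem recvI_of_gt' (a b : Int) (h : b < a) : recvI b a = ((a - b).natAbs : Int) / 5 := by
  unfold recvI; rw [if_pos h, show (b - a).natAbs = (a - b).natAbs by omega]

theorem recvI_of_le (a b : Int) (h : ¬ b < a) : recvI a b = ((a - b).natAbs : Int) / 5 := by
  unfold recvI
  by_cases h2 : a < b
  · rw [if_pos h2]
  · have : a = b := by omega
    subst this; simp

theorem recvI_of_le' (a b : Int) (h : ¬ b < a) : recvI b a = -(((a - b).natAbs : Int) / 5) := by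
  unfold recvI; rw [if_neg h, show (b - a).natAbs = (a - b).natAbs by omega]

theorem up_contrib (arr : List (List Int)) (i j i' j' : Nat)
    (hij : i < arr.length) (hj : j < rlen arr i)
    (hi' : i' < arr.length) (hj' : j' < rlen arr i') :
    ((updatesFor arr i' j' ((i' : Int) - 1, (j' : Int))).map
        (fun e => if e.1.1 = i ∧ e.1.2 = j then e.2 else 0)).sum =
      (if i' = i ∧ j' = j then (if 1 ≤ i then recvI (getAt arr i j) (getAt arr (i - 1) j) else 0) else 0)
      + (if i' = i + 1 ∧ j' = j then recvI (getAt arr i j) (getAt arr (i + 1) j) else 0) := by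
  have hj'' : (j' : Int) < ((arr.getD i' []).length : Int) := by
    simp only [rlen] at hj'; exact_mod_cast hj'
  unfold updatesFor
  dsimp only
  by_cases hg : 1 ≤ i'
  · rw [if_neg (not_not_intro ⟨by omega, by omega, by omega, hj''⟩)]
    have h1 : ((i' : Int) - 1).toNat = i' - 1 := by omega
    have h2 : ((j' : Int)).toNat = j' := by omega
    rw [h1, h2, if_neg (md_nonneg _)]
    by_cases hab : getAt arr (i' - 1) j' < getAt arr i' j'
    · rw [if_pos hab]
      simp only [List.map_cons, List.map_nil, List.sum_cons, List.sum_nil, add_zero]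
      by_cases c1 : i' = i ∧ j' = j
      · obtain ⟨hc1, hc2⟩ := c1
        rw [hc1] at hg
        rw [hc1, hc2] at hab ⊢
        rw [if_neg (by omega), if_pos ⟨rfl, rfl⟩, if_pos ⟨rfl, rfl⟩, if_pos hg,
          if_neg (by omega), recvI_of_gt _ _ hab]
        ring
      · by_cases c2 : i' = i + 1 ∧ j' = j
        · obtain ⟨hc1, hc2⟩ := c2
          rw [hc1, hc2] at hab ⊢
          have he : i + 1 - 1 = i := by omega
          rw [he] at hab ⊢
          rw [if_pos ⟨rfl, rfl⟩, if_neg (by omega), if_neg (by omega), if_pos ⟨rfl, rfl⟩,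
            recvI_of_gt' _ _ hab]
          ring
        · rw [if_neg (fun h => c2 ⟨by omega, h.2⟩), if_neg c1, if_neg c1, if_neg c2]
    · rw [if_neg hab]
      simp only [List.map_cons, List.map_nil, List.sum_cons, List.sum_nil, add_zero]
      by_cases c1 : i' = i ∧ j' = j
      · obtain ⟨hc1, hc2⟩ := c1
        rw [hc1] at hg
        rw [hc1, hc2] at hab ⊢
        rw [if_pos ⟨rfl, rfl⟩, if_neg (by omega), if_pos ⟨rfl, rfl⟩, if_pos hg,
          if_neg (by omega), recvI_of_le _ _ hab]
      · by_cases c2 : i' = i + 1 ∧ j' = j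
        · obtain ⟨hc1, hc2⟩ := c2
          rw [hc1, hc2] at hab ⊢
          have he : i + 1 - 1 = i := by omega
          rw [he] at hab ⊢
          rw [if_neg (by omega), if_pos ⟨rfl, rfl⟩, if_neg (by omega), if_pos ⟨rfl, rfl⟩,
            recvI_of_le' _ _ hab]
        · rw [if_neg c1, if_neg (fun h => c2 ⟨by omega, h.2⟩), if_neg c1, if_neg c2]
  · rw [if_pos (fun hc => absurd hc.1 (by omega))]
    simp only [List.map_nil, List.sum_nil]
    by_cases c1 : i' = i ∧ j' = j
    · obtain ⟨hc1, hc2⟩ := c1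
      rw [hc1] at hg
      rw [hc1, hc2]
      rw [if_pos ⟨rfl, rfl⟩, if_neg hg, if_neg (by omega)]
      ring
    · rw [if_neg c1, if_neg (fun h => hg (by omega))]
      ring

theorem rt_contrib (arr : List (List Int)) (i j i' j' : Nat)
    (hij : i < arr.length) (hj : j < rlen arr i)
    (hi' : i' < arr.length) (hj' : j' < rlen arr i') :
    ((updatesFor arr i' j' ((i' : Int), (j' : Int) + 1)).map
        (fun e => if e.1.1 = i ∧ e.1.2 = j then e.2 else 0)).sum =
      (if i' = i ∧ j' = j then (if j + 1 < rlen arr i then recvI (getAt arr i j) (getAt arr i (j + 1)) else 0) else 0)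
      + (if i' = i ∧ j' + 1 = j then recvI (getAt arr i j) (getAt arr i (j - 1)) else 0) := by
  unfold updatesFor
  dsimp only
  by_cases hg : j' + 1 < rlen arr i'
  · have hg' : ((j' : Int)) + 1 < ((arr.getD i' []).length : Int) := by
      simp only [rlen] at hg; exact_mod_cast hg
    rw [if_neg (not_not_intro ⟨by omega, by omega, by omega, hg'⟩)]
    have h1 : ((i' : Int)).toNat = i' := by omega
    have h2 : (((j' : Int)) + 1).toNat = j' + 1 := by omega
    rw [h1, h2, if_neg (md_nonneg _)]
    by_cases hab : getAt arr i' (j' + 1) < getAt arr i' j'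
    · rw [if_pos hab]
      simp only [List.map_cons, List.map_nil, List.sum_cons, List.sum_nil, add_zero]
      by_cases c1 : i' = i ∧ j' = j
      · obtain ⟨hc1, hc2⟩ := c1
        rw [hc1, hc2] at hab hg ⊢
        rw [if_neg (by omega), if_pos ⟨rfl, rfl⟩, if_pos ⟨rfl, rfl⟩, if_pos hg,
          if_neg (by omega), recvI_of_gt _ _ hab]
        ring
      · by_cases c2 : i' = i ∧ j' + 1 = j
        · obtain ⟨hc1, hc2⟩ := c2
          rw [hc1] at hab ⊢
          rw [← hc2] at hj ⊢
          have he : j' + 1 - 1 = j' := by omega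
          rw [he]
          rw [if_pos ⟨rfl, rfl⟩, if_neg (by omega), if_neg (by omega), if_pos ⟨rfl, rfl⟩,
            recvI_of_gt' _ _ hab]
          ring
        · rw [if_neg (fun h => c2 ⟨h.1, h.2⟩), if_neg c1, if_neg c1, if_neg c2]
    · rw [if_neg hab]
      simp only [List.map_cons, List.map_nil, List.sum_cons, List.sum_nil, add_zero]
      by_cases c1 : i' = i ∧ j' = j
      · obtain ⟨hc1, hc2⟩ := c1
        rw [hc1, hc2] at hab hg ⊢
        rw [if_pos ⟨rfl, rfl⟩, if_neg (by omega), if_pos ⟨rfl, rfl⟩, if_pos hg,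
          if_neg (by omega), recvI_of_le _ _ hab]
      · by_cases c2 : i' = i ∧ j' + 1 = j
        · obtain ⟨hc1, hc2⟩ := c2
          rw [hc1] at hab ⊢
          rw [← hc2] at hj ⊢
          have he : j' + 1 - 1 = j' := by omega
          rw [he]
          rw [if_neg (by omega), if_pos ⟨rfl, rfl⟩, if_neg (by omega), if_pos ⟨rfl, rfl⟩,
            recvI_of_le' _ _ hab]
        · rw [if_neg c1, if_neg (fun h => c2 ⟨h.1, h.2⟩), if_neg c1, if_neg c2]
  · have hg' : ¬ ((j' : Int)) + 1 < ((arr.getD i' []).length : Int) := by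
      simp only [rlen] at hg
      intro hc; exact hg (by exact_mod_cast hc)
    rw [if_pos (fun hc => hg' hc.2.2.2)]
    simp only [List.map_nil, List.sum_nil]
    by_cases c1 : i' = i ∧ j' = j
    · obtain ⟨hc1, hc2⟩ := c1
      rw [hc1, hc2] at hg ⊢
      rw [if_pos ⟨rfl, rfl⟩, if_neg hg, if_neg (by omega)]
      ring
    · have c2 : ¬ (i' = i ∧ j' + 1 = j) := by
        rintro ⟨rfl, rfl⟩
        exact hg hj
      rw [if_neg c1, if_neg c2]
      ring

theorem cell_contrib (arr : List (List Int)) (i j i' j' : Nat)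
    (hij : i < arr.length) (hj : j < rlen arr i)
    (hi' : i' < arr.length) (hj' : j' < rlen arr i') :
    ((cellUpdates arr (i', j')).map (fun e => if e.1.1 = i ∧ e.1.2 = j then e.2 else 0)).sum =
      (if i' = i ∧ j' = j then (if 1 ≤ i then recvI (getAt arr i j) (getAt arr (i - 1) j) else 0) else 0)
      + (if i' = i + 1 ∧ j' = j then recvI (getAt arr i j) (getAt arr (i + 1) j) else 0)
      + (if i' = i ∧ j' = j then (if j + 1 < rlen arr i then recvI (getAt arr i j) (getAt arr i (j + 1)) else 0) else 0)
      + (if i' = i ∧ j' + 1 = j then recvI (getAt arr i j) (getAt arr i (j - 1)) else 0) := by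
  unfold cellUpdates
  dsimp only
  rw [List.flatMap_cons, List.flatMap_cons, List.flatMap_nil, List.append_nil,
    List.map_append, List.sum_append,
    up_contrib arr i j i' j' hij hj hi' hj', rt_contrib arr i j i' j' hij hj hi' hj']
  ring

theorem getD_tmp0 (arr : List (List Int)) (x : Nat) :
    (tmp0F arr).getD x [] = (arr.getD x []).map (fun _ => (0 : Int)) := by
  rw [List.getD_eq_getElem?_getD, List.getD_eq_getElem?_getD]
  unfold tmp0F
  rw [List.getElem?_map]
  rcases arr[x]? with _ | r <;> simp

theorem rowlen_tmp0 (arr : List (List Int)) (x : Nat) :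
    ((tmp0F arr).getD x []).length = rlen arr x := by
  rw [getD_tmp0]; simp [rlen]

theorem getAt_tmp0 (arr : List (List Int)) (i j : Nat) : getAt (tmp0F arr) i j = 0 := by
  unfold getAt
  rw [getD_tmp0, List.getD_eq_getElem?_getD, List.getElem?_map]
  rcases (arr.getD i [])[j]? with _ | v <;> simp

theorem sumR_split4 (m : Nat) (f1 f2 f3 f4 : Nat → Int) :
    sumR m (fun x => f1 x + f2 x + f3 x + f4 x) = sumR m f1 + sumR m f2 + sumR m f3 + sumR m f4 := by
  induction m with
  | zero => simp [sumR]
  | succ k ih =>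
      unfold sumR at ih ⊢
      rw [List.range_succ]
      simp only [List.map_append, List.sum_append, List.map_cons, List.map_nil,
        List.sum_cons, List.sum_nil]
      rw [ih]
      ring

theorem sum_E1 (arr : List (List Int)) (g : Nat × Nat → Int) :
    ((E1 arr).map g).sum = sumR arr.length (fun i' => sumR (rlen arr i') (fun j' => g (i', j'))) := by
  unfold E1
  rw [sum_map_flatMap]
  unfold sumR
  congr 1
  apply List.map_congr_left
  intro i _
  rw [List.map_map]
  rfl

theorem getAt_tmpF (arr : List (List Int)) (i j : Nat)
    (hij : i < arr.length) (hj : j < rlen arr i) :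
    getAt (tmpF arr) i j =
      (if 1 ≤ i then recvI (getAt arr i j) (getAt arr (i - 1) j) else 0)
      + (if i + 1 < arr.length ∧ j < rlen arr (i + 1) then recvI (getAt arr i j) (getAt arr (i + 1) j) else 0)
      + (if 1 ≤ j then recvI (getAt arr i j) (getAt arr i (j - 1)) else 0)
      + (if j + 1 < rlen arr i then recvI (getAt arr i j) (getAt arr i (j + 1)) else 0) := by
  unfold tmpF
  rw [getAt_applyAll, getAt_tmp0, zero_add]
  have hcond : (fun (e : (Nat × Nat) × Int) =>
      if e.1.1 = i ∧ e.1.2 = j ∧ j < ((tmp0F arr).getD i []).length then e.2 else 0)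
      = (fun (e : (Nat × Nat) × Int) => if e.1.1 = i ∧ e.1.2 = j then e.2 else 0) := by
    funext e
    rw [rowlen_tmp0]
    by_cases h : e.1.1 = i ∧ e.1.2 = j
    · rw [if_pos ⟨h.1, h.2, hj⟩, if_pos h]
    · rw [if_neg (by tauto), if_neg h]
  rw [hcond, sum_map_flatMap, sum_E1]
  rw [sumR_congr (fun i' hi' => sumR_congr (fun j' hj2 =>
    cell_contrib arr i j i' j' hij hj hi' hj2))]
  rw [sumR_congr (fun i' _ => sumR_split4 (rlen arr i') _ _ _ _), sumR_split4]
  rw [sumR2_ite, sumR2_ite, sumR2_ite]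
  rw [if_pos (⟨hij, hj⟩ : i < arr.length ∧ j < rlen arr i),
    if_pos (⟨hij, hj⟩ : i < arr.length ∧ j < rlen arr i)]
  by_cases hj1 : 1 ≤ j
  · have step : (sumR arr.length fun i' => sumR (rlen arr i') fun j' =>
        if i' = i ∧ j' + 1 = j then recvI (getAt arr i j) (getAt arr i (j - 1)) else 0)
        = (sumR arr.length fun i' => sumR (rlen arr i') fun j' =>
        if i' = i ∧ j' = j - 1 then recvI (getAt arr i j) (getAt arr i (j - 1)) else 0) :=
      sumR_congr (fun i' _ => sumR_congr (fun j' _ => by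
        by_cases h : i' = i ∧ j' + 1 = j
        · rw [if_pos h, if_pos (⟨h.1, by omega⟩ : i' = i ∧ j' = j - 1)]
        · rw [if_neg h, if_neg (fun hc => h ⟨hc.1, by omega⟩)]))
    rw [step, sumR2_ite, if_pos (⟨hij, by omega⟩ : i < arr.length ∧ j - 1 < rlen arr i),
      if_pos hj1]
    ring
  · have step : (sumR arr.length fun i' => sumR (rlen arr i') fun j' =>
        if i' = i ∧ j' + 1 = j then recvI (getAt arr i j) (getAt arr i (j - 1)) else 0)
        = (sumR arr.length fun i' => sumR (rlen arr i') fun _ => (0 : Int)) :=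
      sumR_congr (fun i' _ => sumR_congr (fun j' _ => by
        rw [if_neg (fun hc => hj1 (by omega))]))
    have step2 : (sumR arr.length fun i' => sumR (rlen arr i') fun _ => (0 : Int))
        = (sumR arr.length fun _ => (0 : Int)) :=
      sumR_congr (fun i' _ => sumR_zero (rlen arr i'))
    rw [step, step2, sumR_zero, if_neg hj1]
    ring

theorem alt_length (arr : List (List Int)) : (fish_control_alt arr).length = arr.length := by
  simp [fish_control_alt]

theorem rowlen_alt (arr : List (List Int)) (x : Nat) :
    ((fish_control_alt arr).getD x []).length = rlen arr x := by
  rw [List.getD_eq_getElem?_getD]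
  unfold fish_control_alt
  rw [List.getElem?_map]
  by_cases h : x < arr.length
  · rw [List.getElem?_range h]
    simp [rlen]
  · rw [List.getElem?_eq_none_iff.mpr (by simpa using h)]
    simp only [Option.map_none, Option.getD_none]
    simp only [rlen]
    rw [List.getD_eq_getElem?_getD, List.getElem?_eq_none_iff.mpr (by omega)]
    rfl

theorem getAt_alt (arr : List (List Int)) (i j : Nat)
    (hi : i < arr.length) (hj : j < rlen arr i) :
    getAt (fish_control_alt arr) i j =
      getAt arr i j +
      ((if 0 < i ∧ j < rlen arr (i - 1) then recvI (getAt arr i j) (getAt arr (i - 1) j) else 0)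
      + (if i + 1 < arr.length ∧ j < rlen arr (i + 1) then recvI (getAt arr i j) (getAt arr (i + 1) j) else 0)
      + (if 0 < j then recvI (getAt arr i j) (getAt arr i (j - 1)) else 0)
      + (if j + 1 < rlen arr i then recvI (getAt arr i j) (getAt arr i (j + 1)) else 0)) := by
  have hrow : (fish_control_alt arr).getD i [] =
      (List.range (arr.getD i []).length).map (fun j =>
        (arr.getD i []).getD j 0 +
        ((if 0 < i ∧ j < (arr.getD (i - 1) []).length then recvI ((arr.getD i []).getD j 0) ((arr.getD (i - 1) []).getD j 0) else 0)
        + (if i + 1 < arr.length ∧ j < (arr.getD (i + 1) []).length then recvI ((arr.getD i []).getD j 0) ((arr.getD (i + 1) []).getD j 0) else 0)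
        + (if 0 < j then recvI ((arr.getD i []).getD j 0) ((arr.getD i []).getD (j - 1) 0) else 0)
        + (if j + 1 < (arr.getD i []).length then recvI ((arr.getD i []).getD j 0) ((arr.getD i []).getD (j + 1) 0) else 0))) := by
    rw [List.getD_eq_getElem _ _ (show i < (fish_control_alt arr).length by
      rw [alt_length]; exact hi)]
    unfold fish_control_alt
    dsimp only
    rw [List.getElem_map]
    simp only [List.getElem_range]
  unfold getAt
  rw [hrow, List.getD_eq_getElem _ 0 (by simpa using hj), List.getElem_map]
  simp only [List.getElem_range, rlen]
  rfl

theorem getAt_fish (arr : List (List Int)) (i j : Nat)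
    (hi : i < arr.length) (hj : j < rlen arr i) :
    getAt (fish_control arr) i j = getAt arr i j + getAt (tmpF arr) i j := by
  rw [fish_control_eq, getAt_applyAll, List.map_map]
  congr 1
  have step : ((E1 arr).map ((fun (e : (Nat × Nat) × Int) =>
        if e.1.1 = i ∧ e.1.2 = j ∧ j < (arr.getD i []).length then e.2 else 0) ∘
        (fun e => (e, getAt (tmpF arr) e.1 e.2)))).sum
      = ((E1 arr).map (fun e => if e.1 = i ∧ e.2 = j then getAt (tmpF arr) i j else 0)).sum := by
    congr 1
    apply List.map_congr_left
    intro e _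
    simp only [Function.comp]
    by_cases h : e.1 = i ∧ e.2 = j
    · rw [if_pos ⟨h.1, h.2, hj⟩, if_pos h, h.1, h.2]
    · rw [if_neg (by tauto), if_neg h]
  rw [step, sum_E1, sumR2_ite, if_pos ⟨hi, hj⟩]

theorem grid_ext {u v : List (List Int)} (hl : u.length = v.length)
    (hr : ∀ x, (u.getD x []).length = (v.getD x []).length)
    (hc : ∀ i j, i < u.length → j < (u.getD i []).length → getAt u i j = getAt v i j) :
    u = v := by
  apply List.ext_getElem hl
  intro x h1 h2
  have hu : u.getD x [] = u[x] := List.getD_eq_getElem u [] h1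
  have hv : v.getD x [] = v[x] := List.getD_eq_getElem v [] h2
  apply List.ext_getElem (by rw [← hu, ← hv]; exact hr x)
  intro y hy1 hy2
  have := hc x y h1 (by rw [hu]; exact hy1)
  unfold getAt at this
  rwa [hu, hv, List.getD_eq_getElem _ 0 hy1, List.getD_eq_getElem _ 0 hy2] at this

-- ===== VERDICT (by name: the statement is the Claim_ definition above) =====
theorem fish_control_spec : Claim_equal_fish_control := by
  intro arr _ hpre
  unfold Spec_fish_control
  apply grid_ext
  · rw [fish_control_eq, length_applyAll, alt_length]
  · intro x
    rw [fish_control_eq, rowlen_applyAll, rowlen_alt]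
    rfl
  · intro i j hi hj
    rw [fish_control_eq, length_applyAll] at hi
    rw [fish_control_eq, rowlen_applyAll] at hj
    have hj' : j < rlen arr i := hj
    rw [getAt_fish arr i j hi hj', getAt_alt arr i j hi hj', getAt_tmpF arr i j hi hj']
    have hup : (if 1 ≤ i then recvI (getAt arr i j) (getAt arr (i - 1) j) else 0)
        = (if 0 < i ∧ j < rlen arr (i - 1) then recvI (getAt arr i j) (getAt arr (i - 1) j) else 0) := by
      by_cases h1 : 1 ≤ i
      · have hle : rlen arr i ≤ rlen arr (i - 1) := by
          have := hpre (i - 1) (List.mem_range.mpr (by omega))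
          simp only [rlen]
          have he : i - 1 + 1 = i := by omega
          rwa [he] at this
        rw [if_pos h1, if_pos ⟨h1, by omega⟩]
      · rw [if_neg h1, if_neg (fun hc => h1 hc.1)]
    have hleft : (if 1 ≤ j then recvI (getAt arr i j) (getAt arr i (j - 1)) else 0)
        = (if 0 < j then recvI (getAt arr i j) (getAt arr i (j - 1)) else 0) := by
      by_cases h : 0 < j
      · rw [if_pos (show 1 ≤ j by omega), if_pos h]
      · rw [if_neg (show ¬ 1 ≤ j by omega), if_neg h]
    rw [hup, hleft]
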